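-- pv_equiv track=rewrite | github.com/arcorck/DUT-AS | algo-progra/td4-celene/nombre_symetrique.py | int_to_liste_inverse
-- ===== SOURCE A (Python) =====
-- def int_to_liste_inverse (nombre) :
--     """cette fonction prend un chiffre en parametre et renvoie une liste en mettant les unités
-- dans le premier élément de cette liste"""
--     res = []
--     if nombre < 0 :
--         nombre = nombre * (-1)
--     while nombre > 9:
--         res.append(nombre%10)
--         nombre = nombre // 10
--     res.append(nombre)
--     return res
-- ===== SOURCE B (Python) =====
-- def int_to_liste_inverse(nombre):
--     """String-based decomposition: the digits of abs(nombre) read units-first."""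
--     return [ord(c) - 48 for c in reversed(str(abs(nombre)))]
-- ===== Notes on version B (the rewrite author's own statement) =====
-- stated objective: idiomatic
-- what changed: Replaces the %/// arithmetic extraction loop with a one-line string decomposition: str(abs(n)) iterated in reverse, each character mapped back to its digit value.
import Mathlib
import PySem

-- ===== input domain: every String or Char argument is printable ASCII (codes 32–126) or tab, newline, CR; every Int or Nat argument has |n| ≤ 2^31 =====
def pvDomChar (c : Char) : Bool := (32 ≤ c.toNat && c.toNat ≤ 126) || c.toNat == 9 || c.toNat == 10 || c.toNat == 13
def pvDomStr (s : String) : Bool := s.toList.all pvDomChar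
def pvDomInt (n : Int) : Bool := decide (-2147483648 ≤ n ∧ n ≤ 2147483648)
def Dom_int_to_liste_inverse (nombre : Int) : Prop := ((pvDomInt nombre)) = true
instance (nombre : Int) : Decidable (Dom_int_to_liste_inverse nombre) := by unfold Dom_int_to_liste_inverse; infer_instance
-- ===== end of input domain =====

-- B replaces A's %/// arithmetic extraction loop by an idiomatic string decomposition
-- (str(abs(n)) read in reverse, characters mapped back to digit values); same cost.


-- ===== PORT A =====
-- the 'while nombre > 9' loop, state = (nombre, res); terminating because nombre strictly drops
def aLoop (nombre : Int) (res : List Int) : List Int :=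
  if nombre > 9 then
    aLoop (PySem.Int.floordiv nombre 10) (res ++ [PySem.Int.mod nombre 10])
  else res ++ [nombre]
termination_by nombre.toNat
decreasing_by
  simp only [PySem.Int.floordiv, Int.fdiv_eq_ediv]
  omega

def int_to_liste_inverse (nombre : Int) : List Int :=
  aLoop (if nombre < 0 then nombre * (-1) else nombre) []

-- ===== PORT B =====
def int_to_liste_inverse_alt (nombre : Int) : List Int :=
  ((PySem.Int.toStr (if nombre < 0 then -nombre else nombre)).toList.reverse).map
    (fun c => (c.toNat : Int) - 48)

-- ===== PRECONDITION & SPEC =====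
def Spec_int_to_liste_inverse (nombre : Int) (out : List Int) : Prop := out = int_to_liste_inverse_alt nombre
instance (nombre : Int) (out : List Int) : Decidable (Spec_int_to_liste_inverse nombre out) := by unfold Spec_int_to_liste_inverse; infer_instance

-- ===== CLAIM (what is proved, stated in full; the proofs are below) =====
def Claim_equal_int_to_liste_inverse : Prop := ∀ (nombre : Int), Dom_int_to_liste_inverse nombre → Spec_int_to_liste_inverse nombre (int_to_liste_inverse nombre)

-- ===== LEMMAS AND PROOFS =====

-- A's loop on a nonnegative input produces the little-endian decimal digits ([0] for 0)
lemma aLoop_eq (m : Nat) (res : List Int) :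
    aLoop (m : Int) res
      = res ++ (if m = 0 then [0] else (Nat.digits 10 m).map (fun d : ℕ => (d : Int))) := by
  induction m using Nat.strong_induction_on generalizing res with
  | _ m ih =>
    rw [show aLoop (m : Int) res = if (m:Int) > 9 then aLoop (PySem.Int.floordiv (m:Int) 10) (res ++ [PySem.Int.mod (m:Int) 10]) else res ++ [(m:Int)] from by rw [aLoop]]
    by_cases h : (m : Int) > 9
    · have hm : 9 < m := by exact_mod_cast h
      simp only [h, if_true]
      have hdiv : PySem.Int.floordiv (m : Int) 10 = ((m / 10 : Nat) : Int) := by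
        simp only [PySem.Int.floordiv, Int.fdiv_eq_ediv]
        norm_num
      have hmod : PySem.Int.mod (m : Int) 10 = ((m % 10 : Nat) : Int) := by
        simp only [PySem.Int.mod, Int.fmod_eq_emod]
        norm_num
      rw [hdiv, hmod, ih (m / 10) (by omega)]
      have h10 : m / 10 ≠ 0 := by omega
      have hm0 : m ≠ 0 := by omega
      simp only [h10, if_false, hm0]
      rw [Nat.digits_def' (by norm_num : (1:ℕ) < 10) (by omega : 0 < m)]
      simp
    · have hm : m ≤ 9 := by omega
      simp only [h, if_false]
      by_cases h0 : m = 0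
      · simp [h0]
      · rw [Nat.digits_def' (by norm_num : (1:ℕ) < 10) (by omega : 0 < m)]
        have : m % 10 = m := by omega
        have h2 : m / 10 = 0 := by omega
        simp [this, h2, h0]

-- Nat.toDigitsCore produces the big-endian digit characters (given enough fuel)
lemma toDigitsCore_eq (m : Nat) (fuel : Nat) (ds : List Char) (hf : m < fuel) :
    Nat.toDigitsCore 10 fuel m ds
      = (if m = 0 then ['0']
         else ((Nat.digits 10 m).map Nat.digitChar).reverse) ++ ds := by
  induction m using Nat.strong_induction_on generalizing fuel ds with
  | _ m ih =>
    match fuel, hf with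
    | fuel + 1, hf =>
      rw [Nat.toDigitsCore]
      by_cases h : m / 10 = 0
      · simp only [h, if_true]
        by_cases h0 : m = 0
        · simp [h0, show Nat.digitChar 0 = '0' from rfl]
        · rw [Nat.digits_def' (by norm_num : (1:ℕ) < 10) (by omega : 0 < m)]
          have h2 : Nat.digits 10 (m / 10) = [] := by simp [h]
          simp [h2, h0]
      · simp only [h, if_false]
        rw [ih (m / 10) (by omega) fuel ((m % 10).digitChar :: ds) (by omega)]
        have h0 : m ≠ 0 := by omega
        simp only [h, if_false, h0]
        rw [Nat.digits_def' (by norm_num : (1:ℕ) < 10) (by omega : 0 < m)]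
        simp

lemma digitChar_val (d : Nat) (hd : d < 10) :
    ((Nat.digitChar d).toNat : Int) - 48 = (d : Int) := by
  interval_cases d <;> decide

-- ===== VERDICT (by name: the statement is the Claim_ definition above) =====
theorem int_to_liste_inverse_spec : Claim_equal_int_to_liste_inverse := by
  intro nombre _
  unfold Spec_int_to_liste_inverse int_to_liste_inverse int_to_liste_inverse_alt
  have hA : (if nombre < 0 then nombre * (-1) else nombre) = ((nombre.natAbs : Nat) : Int) := by
    split_ifs <;> omega
  have hB : (if nombre < 0 then -nombre else nombre) = ((nombre.natAbs : Nat) : Int) := by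
    split_ifs <;> omega
  rw [hA, hB]
  generalize nombre.natAbs = m
  rw [aLoop_eq m []]
  have htl : (PySem.Int.toStr (m : Int)).toList = Nat.toDigits 10 m := by
    rw [PySem.Int.toList_toStr]
    simp [PySem.Int.toChars, Int.not_lt.mpr (by positivity : (0:Int) ≤ (m:Int))]
  rw [htl]
  unfold Nat.toDigits
  rw [toDigitsCore_eq m (m + 1) [] (by omega)]
  by_cases h0 : m = 0
  · subst h0
    decide
  · rw [if_neg h0, if_neg h0, List.nil_append, List.append_nil, List.reverse_reverse,
      List.map_map]
    refine List.map_congr_left ?_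
    intro d hd
    exact (digitChar_val d (Nat.digits_lt_base (by norm_num) hd)).symm
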